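-- pv_equiv track=rewrite | github.com/EnviDat/ckanext-envidat_theme | ckanext/envidat_theme/helpers.py | _markup_links
-- ===== SOURCE A (Python) =====
-- def _markup_links(text):
--     markup_text = []
--     for token in text.split(' '):
--         if token.find('http://')==0 or token.find('https://')==0:
--             start = token.find('//') + len('//')
--             tag = token[start:]
--             markup_text += ['<a href="' + token + '" target="_blank">' + tag + '</a>']
--         else:
--             markup_text += [token]
--     return ' '.join(markup_text)
-- ===== SOURCE B (Python) =====
-- def _markup_links(text):
--     out = []
--     i = 0
--     n = len(text)
--     boundary = True
--     while i < n:
--         if boundary and (text.startswith('http://', i) or text.startswith('https://', i)):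
--             j = text.find(' ', i)
--             if j < 0:
--                 j = n
--             token = text[i:j]
--             tag = token[7:] if text.startswith('http://', i) else token[8:]
--             out.append('<a href="' + token + '" target="_blank">' + tag + '</a>')
--             i = j
--             boundary = False
--         else:
--             c = text[i]
--             out.append(c)
--             boundary = c == ' '
--             i += 1
--     return ''.join(out)
-- ===== Notes on version B (the rewrite author's own statement) =====
-- stated objective: alternative
-- what changed: B never splits the text into a token list: it does a single positional scan with a boundary flag, matching a URL scheme in place at start-of-string or right after a space, jumping directly to the next space to emit each anchor, and copying every other character verbatim.
import Mathlib
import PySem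

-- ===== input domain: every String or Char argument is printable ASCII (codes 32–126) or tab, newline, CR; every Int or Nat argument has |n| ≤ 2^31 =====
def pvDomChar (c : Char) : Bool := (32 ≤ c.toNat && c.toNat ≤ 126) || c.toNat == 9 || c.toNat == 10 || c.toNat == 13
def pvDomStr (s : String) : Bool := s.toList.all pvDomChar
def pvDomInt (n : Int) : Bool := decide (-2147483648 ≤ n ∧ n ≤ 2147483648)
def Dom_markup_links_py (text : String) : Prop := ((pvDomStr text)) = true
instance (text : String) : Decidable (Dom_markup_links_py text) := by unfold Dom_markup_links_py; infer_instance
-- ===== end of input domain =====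

set_option maxRecDepth 8000


-- B never splits the text: a single positional scan with a boundary flag matches 'http(s)://' in
-- place, jumps to the next space to emit each anchor and copies all other characters verbatim
-- (objective: alternative decomposition, same asymptotic cost).

-- ===== PORT A =====
-- loop body of A: wrap a token if token.find('http://')==0 or token.find('https://')==0,
-- with tag = token[token.find('//') + len('//'):]
def pvWrapA (token : List Char) : List Char :=
  if PySem.Chars.find token "http://".toList == 0 || PySem.Chars.find token "https://".toList == 0 then
    "<a href=\"".toList ++ token ++ "\" target=\"_blank\">".toList
      ++ PySem.List.slice token (some (PySem.Chars.find token "//".toList + ("//".toList.length : Int))) none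
      ++ "</a>".toList
  else token

def markup_links_py (text : String) : String :=
  let markup_text := (PySem.Chars.splitOn text.toList [' ']).foldl
    (fun acc token => acc ++ [pvWrapA token]) []
  String.ofList (PySem.Chars.join [' '] markup_text)

-- ===== PORT B =====
-- Source B's while loop: position scan with a boundary flag; at a boundary where 'http://' or
-- 'https://' matches, the token runs to the next space (text.find(' ', i)); since the matched
-- head is 'h' ≠ ' ', token = c :: rest.takeWhile (≠ ' ') and the scan resumes at the space.
def pvScanB : List Char → Bool → List Char
  | [], _ => []
  | c :: rest, boundary =>
    if boundary && ("http://".toList.isPrefixOf (c :: rest) || "https://".toList.isPrefixOf (c :: rest)) then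
      let token := c :: rest.takeWhile (· ≠ ' ')
      let tag := if "http://".toList.isPrefixOf (c :: rest) then token.drop 7 else token.drop 8
      "<a href=\"".toList ++ token ++ "\" target=\"_blank\">".toList ++ tag ++ "</a>".toList
        ++ pvScanB (rest.dropWhile (· ≠ ' ')) false
    else c :: pvScanB rest (c == ' ')
termination_by l _ => l.length
decreasing_by
  · exact Nat.lt_succ_of_le (List.length_dropWhile_le _ _)
  · exact Nat.lt_succ_self _

def markup_links_py_alt (text : String) : String :=
  String.ofList (pvScanB text.toList true)

-- ===== PRECONDITION & SPEC =====
def Spec_markup_links_py (text : String) (out : String) : Prop := out = markup_links_py_alt text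
instance (text : String) (out : String) : Decidable (Spec_markup_links_py text out) := by unfold Spec_markup_links_py; infer_instance

-- ===== CLAIM (what is proved, stated in full; the proofs are below) =====
def Claim_equal_markup_links_py : Prop := ∀ (text : String), Dom_markup_links_py text → Spec_markup_links_py text (markup_links_py text)

-- ===== LEMMAS AND PROOFS =====

-- token-level form of B's wrapping
def pvWrapTok (t : List Char) : List Char :=
  if "http://".toList.isPrefixOf t then
    "<a href=\"".toList ++ t ++ "\" target=\"_blank\">".toList ++ t.drop 7 ++ "</a>".toList
  else if "https://".toList.isPrefixOf t then
    "<a href=\"".toList ++ t ++ "\" target=\"_blank\">".toList ++ t.drop 8 ++ "</a>".toList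
  else t

-- simple structural form of splitting on a single space
def pvSplitSp : List Char → List (List Char)
  | [] => [[]]
  | c :: rest => if c = ' ' then [] :: pvSplitSp rest else (pvSplitSp rest).modifyHead (c :: ·)

lemma pvSplitSp_ne_nil (l : List Char) : pvSplitSp l ≠ [] := by
  induction l with
  | nil => simp [pvSplitSp]
  | cons c rest ih =>
    simp only [pvSplitSp]
    split
    · simp
    · cases h : pvSplitSp rest <;> simp_all [List.modifyHead]

lemma pvGo (fuel : Nat) : ∀ (l cur : List Char) (acc : List (List Char)), l.length ≤ fuel →
    PySem.Chars.splitOn.go [' '] fuel l cur acc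
      = acc.reverse ++ (pvSplitSp l).modifyHead (cur.reverse ++ ·) := by
  induction fuel with
  | zero =>
    intro l cur acc h
    have : l = [] := List.eq_nil_of_length_eq_zero (Nat.le_zero.mp h)
    subst this
    simp [PySem.Chars.splitOn.go, pvSplitSp]
  | succ f ih =>
    intro l cur acc h
    cases l with
    | nil => simp [PySem.Chars.splitOn.go, pvSplitSp]
    | cons c rest =>
      rw [PySem.Chars.splitOn.go.eq_3]
      simp only [List.length_cons] at h
      by_cases hc : c = ' '
      · subst hc
        rw [if_pos (by simp [List.isPrefixOf])]
        rw [show List.drop [' '].length (' ' :: rest) = rest by simp]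
        rw [ih rest [] (cur.reverse :: acc) (by omega)]
        simp [pvSplitSp]
        cases pvSplitSp rest <;> simp
      · rw [if_neg (by simp [List.isPrefixOf]; exact fun h => absurd h.symm hc)]
        rw [ih rest (c :: cur) acc (by omega)]
        simp only [pvSplitSp, if_neg hc, List.reverse_cons]
        rw [List.modifyHead_modifyHead]
        congr 2
        funext x
        simp

lemma pvSplitOn_eq (l : List Char) : PySem.Chars.splitOn l [' '] = pvSplitSp l := by
  rw [PySem.Chars.splitOn, pvGo (l.length + 1) l [] [] (by omega)]
  cases h : pvSplitSp l with
  | nil => exact absurd h (pvSplitSp_ne_nil l)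
  | cons a t => simp [List.modifyHead]

lemma pvFindHttp (rest : List Char) : PySem.Chars.find ("http://".toList ++ rest) "//".toList = 5 := by
  simp [PySem.Chars.find, PySem.Chars.find.go, List.isPrefixOf]

lemma pvFindHttps (rest : List Char) : PySem.Chars.find ("https://".toList ++ rest) "//".toList = 6 := by
  simp [PySem.Chars.find, PySem.Chars.find.go, List.isPrefixOf]

lemma pvFindZero (t sub : List Char) : PySem.Chars.find t sub = 0 ↔ sub <+: t := by
  constructor
  · intro h
    have := PySem.Chars.find_spec (s := t) (sub := sub) (by omega)
    simpa [h] using this.1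
  · intro h
    have h0 : 0 ≤ PySem.Chars.find t sub := (PySem.Chars.find_nonneg_iff t sub).mpr h.isInfix
    have hs := PySem.Chars.find_spec (s := t) (sub := sub) h0
    by_contra hne
    have : (0:Nat) < (PySem.Chars.find t sub).toNat := by omega
    exact hs.2 0 this (by simpa using h)

lemma pvWrap_eq (t : List Char) : pvWrapA t = pvWrapTok t := by
  unfold pvWrapA pvWrapTok
  by_cases h1 : "http://".toList <+: t
  · obtain ⟨rest, hrest⟩ := h1
    subst hrest
    rw [if_pos (by simp; exact Or.inl ((pvFindZero _ _).mpr ⟨rest, rfl⟩))]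
    rw [if_pos (List.isPrefixOf_iff_prefix.mpr ⟨rest, rfl⟩)]
    rw [pvFindHttp]
    rw [show (5 : Int) + ("//".toList.length : Int) = 7 by decide]
    rw [PySem.List.slice_from _ (by norm_num)]
    norm_num [show Int.toNat 7 = 7 from rfl]
  · by_cases h2 : "https://".toList <+: t
    · obtain ⟨rest, hrest⟩ := h2
      subst hrest
      rw [if_pos (by simp; exact Or.inr ((pvFindZero _ _).mpr ⟨rest, rfl⟩))]
      rw [if_neg (by simp [List.isPrefixOf_iff_prefix])]
      rw [if_pos (List.isPrefixOf_iff_prefix.mpr ⟨rest, rfl⟩)]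
      rw [pvFindHttps]
      rw [show (6 : Int) + ("//".toList.length : Int) = 8 by decide]
      rw [PySem.List.slice_from _ (by norm_num)]
      norm_num [show Int.toNat 8 = 8 from rfl]
    · have hne1 : PySem.Chars.find t "http://".toList ≠ 0 := fun h => h1 ((pvFindZero _ _).mp h)
      have hne2 : PySem.Chars.find t "https://".toList ≠ 0 := fun h => h2 ((pvFindZero _ _).mp h)
      rw [if_neg (by simp; exact ⟨hne1, hne2⟩)]
      rw [if_neg (by simpa [List.isPrefixOf_iff_prefix] using h1)]
      rw [if_neg (by simpa [List.isPrefixOf_iff_prefix] using h2)]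

-- a space-free prefix of l is a prefix of l.takeWhile (· ≠ ' '), and conversely
lemma pvPrefix_takeWhile {p l : List Char} (hp : ∀ c ∈ p, c ≠ ' ') :
    p <+: l ↔ p <+: l.takeWhile (· ≠ ' ') := by
  constructor
  · intro h
    induction p generalizing l with
    | nil => simp
    | cons a p' ih =>
      obtain ⟨rest, hrest⟩ := h
      subst hrest
      have ha : a ≠ ' ' := hp a (by simp)
      simp only [List.cons_append, List.takeWhile_cons, decide_eq_true_eq]
      rw [if_pos ha]
      exact List.cons_prefix_cons.mpr ⟨rfl, ih (fun c hc => hp c (by simp [hc])) ⟨rest, rfl⟩⟩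
  · intro h
    exact h.trans (List.takeWhile_prefix _)

lemma pvTakeWhile_cons_of_ne {c : Char} (rest : List Char) (hc : c ≠ ' ') :
    (c :: rest).takeWhile (· ≠ ' ') = c :: rest.takeWhile (· ≠ ' ') := by
  rw [List.takeWhile_cons, if_pos (by simpa using hc)]

lemma pvDropWhile_cons_of_ne {c : Char} (rest : List Char) (hc : c ≠ ' ') :
    (c :: rest).dropWhile (· ≠ ' ') = rest.dropWhile (· ≠ ' ') := by
  rw [List.dropWhile_cons, if_pos (by simpa using hc)]

lemma pvDropWhile_head_space : ∀ (l : List Char) (d : Char) (r : List Char),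
    l.dropWhile (· ≠ ' ') = d :: r → d = ' ' := by
  intro l
  induction l with
  | nil => intro d r h; simp at h
  | cons c rest ih =>
    intro d r h
    by_cases hc : c = ' '
    · subst hc
      rw [List.dropWhile_cons, if_neg (by simp)] at h
      injection h with h1 _
      exact h1.symm
    · rw [pvDropWhile_cons_of_ne rest hc] at h
      exact ih d r h

lemma pvSplitSp_decomp_nil : ∀ l : List Char, l.dropWhile (· ≠ ' ') = [] →
    pvSplitSp l = [l.takeWhile (· ≠ ' ')] := by
  intro l
  induction l with
  | nil => intro _; simp [pvSplitSp]
  | cons c rest ih =>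
    intro hdrop
    by_cases hc : c = ' '
    · subst hc
      rw [List.dropWhile_cons, if_neg (by simp)] at hdrop
      simp at hdrop
    · rw [pvDropWhile_cons_of_ne rest hc] at hdrop
      simp only [pvSplitSp, if_neg hc, ih hdrop, pvTakeWhile_cons_of_ne rest hc,
        List.modifyHead_cons]

lemma pvSplitSp_decomp_cons : ∀ (l r : List Char), l.dropWhile (· ≠ ' ') = ' ' :: r →
    pvSplitSp l = (l.takeWhile (· ≠ ' ')) :: pvSplitSp r := by
  intro l
  induction l with
  | nil => intro r h; simp at h
  | cons c rest ih =>
    intro r hdrop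
    by_cases hc : c = ' '
    · subst hc
      rw [List.dropWhile_cons, if_neg (by simp)] at hdrop
      injection hdrop with _ h2
      subst h2
      simp [pvSplitSp]
    · rw [pvDropWhile_cons_of_ne rest hc] at hdrop
      simp only [pvSplitSp, if_neg hc, ih r hdrop, pvTakeWhile_cons_of_ne rest hc,
        List.modifyHead_cons]

lemma pvHeadH {c : Char} {rest : List Char}
    (hp : ("http://".toList.isPrefixOf (c :: rest) || "https://".toList.isPrefixOf (c :: rest)) = true) :
    c = 'h' := by
  have e7 : "http://".toList = 'h' :: "ttp://".toList := rfl
  have e8 : "https://".toList = 'h' :: "ttps://".toList := rfl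
  rcases Bool.or_eq_true_iff.mp hp with hx | hx
  · rw [e7] at hx
    exact ((List.cons_prefix_cons.mp (List.isPrefixOf_iff_prefix.mp hx)).1).symm
  · rw [e8] at hx
    exact ((List.cons_prefix_cons.mp (List.isPrefixOf_iff_prefix.mp hx)).1).symm

lemma pvPrefix_tok (p : List Char) (hpfree : ∀ d ∈ p, d ≠ ' ') (c : Char) (rest : List Char)
    (hc : c ≠ ' ') :
    p.isPrefixOf (c :: rest) = p.isPrefixOf (c :: rest.takeWhile (· ≠ ' ')) := by
  rw [← pvTakeWhile_cons_of_ne rest hc]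
  rw [Bool.eq_iff_iff, List.isPrefixOf_iff_prefix, List.isPrefixOf_iff_prefix]
  exact pvPrefix_takeWhile hpfree

lemma pvFree7 : ∀ d ∈ "http://".toList, d ≠ ' ' := by
  have h : "http://".toList = ['h','t','t','p',':','/','/'] := rfl
  rw [h]
  intro d hd
  fin_cases hd <;> decide

lemma pvFree8 : ∀ d ∈ "https://".toList, d ≠ ' ' := by
  have h : "https://".toList = ['h','t','t','p','s',':','/','/'] := rfl
  rw [h]
  intro d hd
  fin_cases hd <;> decide

-- controlled unfoldings of pvScanB
lemma pvScanB_copy_step (c : Char) (rest : List Char) :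
    pvScanB (c :: rest) false = c :: pvScanB rest (c == ' ') := by
  rw [pvScanB]
  simp

lemma pvScanB_space (r : List Char) : pvScanB (' ' :: r) false = ' ' :: pvScanB r true := by
  rw [pvScanB_copy_step]
  simp

lemma pvScanB_nowrap (c : Char) (rest : List Char)
    (hp : ("http://".toList.isPrefixOf (c :: rest) || "https://".toList.isPrefixOf (c :: rest)) = false) :
    pvScanB (c :: rest) true = c :: pvScanB rest (c == ' ') := by
  rw [pvScanB, if_neg (by rw [Bool.true_and, hp]; simp)]

lemma pvScanB_wrap (c : Char) (rest : List Char)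
    (hp : ("http://".toList.isPrefixOf (c :: rest) || "https://".toList.isPrefixOf (c :: rest)) = true) :
    pvScanB (c :: rest) true =
      "<a href=\"".toList ++ (c :: rest.takeWhile (· ≠ ' ')) ++ "\" target=\"_blank\">".toList
        ++ (if "http://".toList.isPrefixOf (c :: rest) then (c :: rest.takeWhile (· ≠ ' ')).drop 7
            else (c :: rest.takeWhile (· ≠ ' ')).drop 8)
        ++ "</a>".toList ++ pvScanB (rest.dropWhile (· ≠ ' ')) false := by
  rw [pvScanB, if_pos (by rw [Bool.true_and]; exact hp)]

lemma pvWrapTok_of_scheme (t : List Char)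
    (h : ("http://".toList.isPrefixOf t || "https://".toList.isPrefixOf t) = true) :
    pvWrapTok t = "<a href=\"".toList ++ t ++ "\" target=\"_blank\">".toList
      ++ (if "http://".toList.isPrefixOf t then t.drop 7 else t.drop 8) ++ "</a>".toList := by
  unfold pvWrapTok
  by_cases h7 : "http://".toList.isPrefixOf t = true
  · rw [if_pos h7, if_pos h7]
  · rcases Bool.or_eq_true_iff.mp h with hx | hx
    · exact absurd hx h7
    · rw [if_neg h7, if_pos hx, if_neg h7]

lemma pvWrapTok_plain (t : List Char)
    (h : ("http://".toList.isPrefixOf t || "https://".toList.isPrefixOf t) = false) :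
    pvWrapTok t = t := by
  unfold pvWrapTok
  rcases Bool.or_eq_false_iff.mp h with ⟨h7, h8⟩
  rw [if_neg (by rw [h7]; simp), if_neg (by rw [h8]; simp)]

-- boundary=false copies space-free characters verbatim
lemma pvScan_copy (t : List Char) (ht : ∀ c ∈ t, c ≠ ' ') (l : List Char) :
    pvScanB (t ++ l) false = t ++ pvScanB l false := by
  induction t with
  | nil => simp
  | cons c t' ih =>
    have hc : c ≠ ' ' := ht c (by simp)
    rw [List.cons_append, pvScanB_copy_step, show (c == ' ') = false by simpa using hc,
      ih (fun d hd => ht d (by simp [hd]))]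
    simp

lemma pvJoin_split (a : List Char) (r : List Char) :
    PySem.Chars.join [' '] ((a :: pvSplitSp r).map pvWrapTok)
      = pvWrapTok a ++ ' ' :: PySem.Chars.join [' '] ((pvSplitSp r).map pvWrapTok) := by
  cases hps : pvSplitSp r with
  | nil => exact absurd hps (pvSplitSp_ne_nil r)
  | cons b t =>
    rw [List.map_cons, List.map_cons, PySem.Chars.join_cons_cons]
    simp

lemma pvScanB_nil : pvScanB [] false = [] := by rw [pvScanB]

lemma pvScan_true (n : Nat) : ∀ l : List Char, l.length ≤ n →
    pvScanB l true = PySem.Chars.join [' '] ((pvSplitSp l).map pvWrapTok) := by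
  induction n with
  | zero =>
    intro l h
    have : l = [] := List.eq_nil_of_length_eq_zero (Nat.le_zero.mp h)
    subst this
    simp [pvScanB, pvSplitSp, pvWrapTok, PySem.Chars.join_singleton]
  | succ n ih =>
    intro l h
    cases l with
    | nil => simp [pvScanB, pvSplitSp, pvWrapTok, PySem.Chars.join_singleton]
    | cons c rest =>
      simp only [List.length_cons] at h
      have hlen_drop : ∀ r' : List Char, rest.dropWhile (· ≠ ' ') = ' ' :: r' → r'.length ≤ n := by
        intro r' hdrop
        have h1 : (' ' :: r').length ≤ rest.length := by
          rw [← hdrop]; exact List.length_dropWhile_le _ _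
        simp at h1; omega
      by_cases hp : ("http://".toList.isPrefixOf (c :: rest) || "https://".toList.isPrefixOf (c :: rest)) = true
      · -- wrapped-token case: c = 'h' ≠ ' '
        have hc : c ≠ ' ' := by rw [pvHeadH hp]; decide
        have htokp : ("http://".toList.isPrefixOf (c :: rest.takeWhile (· ≠ ' '))
            || "https://".toList.isPrefixOf (c :: rest.takeWhile (· ≠ ' '))) = true := by
          rw [← pvPrefix_tok _ pvFree7 _ _ hc, ← pvPrefix_tok _ pvFree8 _ _ hc]
          exact hp
        rw [pvScanB_wrap c rest hp,
          pvPrefix_tok _ pvFree7 _ _ hc,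
          ← pvWrapTok_of_scheme _ htokp]
        cases hdrop : rest.dropWhile (· ≠ ' ') with
        | nil =>
          rw [pvSplitSp_decomp_nil (c :: rest) (by rw [pvDropWhile_cons_of_ne rest hc]; exact hdrop)]
          rw [pvTakeWhile_cons_of_ne rest hc, List.map_cons, List.map_nil,
            PySem.Chars.join_singleton, pvScanB_nil]
          simp
        | cons d r =>
          have hdsp : d = ' ' := pvDropWhile_head_space rest d r hdrop
          subst hdsp
          rw [pvSplitSp_decomp_cons (c :: rest) r (by rw [pvDropWhile_cons_of_ne rest hc]; exact hdrop)]
          rw [pvTakeWhile_cons_of_ne rest hc, pvJoin_split, pvScanB_space,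
            ih r (hlen_drop r hdrop)]
      · -- plain-copy case
        have hp' : ("http://".toList.isPrefixOf (c :: rest) || "https://".toList.isPrefixOf (c :: rest)) = false :=
          Bool.eq_false_iff.mpr hp
        rw [pvScanB_nowrap c rest hp']
        by_cases hc : c = ' '
        · subst hc
          rw [show ((' ' : Char) == ' ') = true by decide, ih rest (by omega)]
          rw [show pvSplitSp (' ' :: rest) = [] :: pvSplitSp rest by simp [pvSplitSp]]
          rw [pvJoin_split, show pvWrapTok [] = [] by rfl]
          simp
        · have htoknp : ("http://".toList.isPrefixOf (c :: rest.takeWhile (· ≠ ' '))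
              || "https://".toList.isPrefixOf (c :: rest.takeWhile (· ≠ ' '))) = false := by
            rw [← pvPrefix_tok _ pvFree7 _ _ hc, ← pvPrefix_tok _ pvFree8 _ _ hc]
            exact hp'
          rw [show (c == ' ') = false by simpa using hc]
          rw [show pvScanB rest false
              = pvScanB (rest.takeWhile (· ≠ ' ') ++ rest.dropWhile (· ≠ ' ')) false by
            rw [List.takeWhile_append_dropWhile]]
          rw [pvScan_copy _ (fun d hd => by simpa using List.mem_takeWhile_imp hd)]
          cases hdrop : rest.dropWhile (· ≠ ' ') with
          | nil =>
            rw [pvSplitSp_decomp_nil (c :: rest) (by rw [pvDropWhile_cons_of_ne rest hc]; exact hdrop)]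
            rw [pvTakeWhile_cons_of_ne rest hc, List.map_cons, List.map_nil,
              PySem.Chars.join_singleton, pvWrapTok_plain _ htoknp, pvScanB_nil]
            simp
          | cons d r =>
            have hdsp : d = ' ' := pvDropWhile_head_space rest d r hdrop
            subst hdsp
            rw [pvSplitSp_decomp_cons (c :: rest) r (by rw [pvDropWhile_cons_of_ne rest hc]; exact hdrop)]
            rw [pvTakeWhile_cons_of_ne rest hc, pvJoin_split, pvWrapTok_plain _ htoknp,
              pvScanB_space, ih r (hlen_drop r hdrop)]
            simp

-- ===== VERDICT (by name: the statement is the Claim_ definition above) =====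
theorem markup_links_py_spec : Claim_equal_markup_links_py := by
  intro text _
  unfold Spec_markup_links_py markup_links_py markup_links_py_alt
  rw [pvScan_true text.toList.length text.toList (le_refl _)]
  simp only [PySem.List.foldl_append_singleton_eq_map, List.nil_append, pvSplitOn_eq]
  congr 2
  exact List.map_congr_left fun t _ => pvWrap_eq t
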